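-- pv_equiv track=rewrite | github.com/multivac61/aoc | year/2020.py | solve_jigsaw
-- ===== SOURCE A (Python) =====
-- def get_edges(grid):
--     top = "".join(grid[0])
--     bottom = "".join(grid[-1])
--     left = "".join(row[0] for row in grid)
--     right = "".join(row[-1] for row in grid)
--     return [top, right, bottom, left]
--
-- def get_all_orientations(grid):
--     orientations = []
--     current = grid
--
--     for _ in range(4):
--         orientations.append([row[:] for row in current])
--         current = [list(row) for row in zip(*current[::-1])]
--
--     flipped = [row[::-1] for row in grid]
--     current = flipped
--
--     for _ in range(4):
--         orientations.append([row[:] for row in current])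
--         current = [list(row) for row in zip(*current[::-1])]
--
--     return orientations
--
-- def solve_jigsaw(tiles):
--     tile_dict = {}
--     for tile_id, grid in tiles:
--         tile_dict[tile_id] = grid
--
--     # Find all unique edges and their reverse
--     all_edges = set()
--     tile_edges = {}
--
--     for tile_id, grid in tiles:
--         edges = get_edges(grid)
--         tile_edges[tile_id] = edges
--         for edge in edges:
--             all_edges.add(edge)
--             all_edges.add(edge[::-1])  # Add reverse
--
--     # Count how many tiles each edge appears in
--     edge_counts = {}
--     for tile_id, grid in tiles:
--         for orientation in get_all_orientations(grid):
--             edges = get_edges(orientation)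
--             for edge in edges:
--                 if edge not in edge_counts:
--                     edge_counts[edge] = set()
--                 edge_counts[edge].add(tile_id)
--
--     # Corner tiles have exactly 2 edges that don't match any other tile
--     corner_tiles = []
--     for tile_id, grid in tiles:
--         edges = get_edges(grid)
--         unmatched_edges = 0
--         for edge in edges:
--             # Check if this edge matches any other tile
--             matched = False
--             for other_tile_id, other_grid in tiles:
--                 if other_tile_id == tile_id:
--                     continue
--                 for other_orientation in get_all_orientations(other_grid):
--                     other_edges = get_edges(other_orientation)
--                     if edge in other_edges or edge[::-1] in other_edges:
--                         matched = True
--                         break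
--                 if matched:
--                     break
--             if not matched:
--                 unmatched_edges += 1
--
--         if unmatched_edges == 2:
--             corner_tiles.append(tile_id)
--
--     return corner_tiles
-- ===== SOURCE B (Python) =====
-- def get_edges(grid):
--     top = "".join(grid[0])
--     bottom = "".join(grid[-1])
--     left = "".join(row[0] for row in grid)
--     right = "".join(row[-1] for row in grid)
--     return [top, right, bottom, left]
--
-- def get_all_orientations(grid):
--     orientations = []
--     current = grid
--     for _ in range(4):
--         orientations.append([row[:] for row in current])
--         current = [list(row) for row in zip(*current[::-1])]
--     flipped = [row[::-1] for row in grid]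
--     current = flipped
--     for _ in range(4):
--         orientations.append([row[:] for row in current])
--         current = [list(row) for row in zip(*current[::-1])]
--     return orientations
--
-- def solve_jigsaw(tiles):
--     # Index every edge of every orientation once: edge -> set of tile ids.
--     index = {}
--     for tile_id, grid in tiles:
--         for orientation in get_all_orientations(grid):
--             for edge in get_edges(orientation):
--                 index.setdefault(edge, set()).add(tile_id)
--     corners = []
--     for tile_id, grid in tiles:
--         unmatched = 0
--         for edge in get_edges(grid):
--             owners = index.get(edge, set()) | index.get(edge[::-1], set())
--             if not (owners - {tile_id}):
--                 unmatched += 1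
--         if unmatched == 2:
--             corners.append(tile_id)
--     return corners
-- ===== Notes on version B (the rewrite author's own statement) =====
-- stated objective: faster
-- what changed: B builds one edge->tile-id-set index over all orientations in a single pass and decides each edge by two dictionary lookups, instead of A's per-tile-per-edge rescan of every other tile's orientations.
import Mathlib
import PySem

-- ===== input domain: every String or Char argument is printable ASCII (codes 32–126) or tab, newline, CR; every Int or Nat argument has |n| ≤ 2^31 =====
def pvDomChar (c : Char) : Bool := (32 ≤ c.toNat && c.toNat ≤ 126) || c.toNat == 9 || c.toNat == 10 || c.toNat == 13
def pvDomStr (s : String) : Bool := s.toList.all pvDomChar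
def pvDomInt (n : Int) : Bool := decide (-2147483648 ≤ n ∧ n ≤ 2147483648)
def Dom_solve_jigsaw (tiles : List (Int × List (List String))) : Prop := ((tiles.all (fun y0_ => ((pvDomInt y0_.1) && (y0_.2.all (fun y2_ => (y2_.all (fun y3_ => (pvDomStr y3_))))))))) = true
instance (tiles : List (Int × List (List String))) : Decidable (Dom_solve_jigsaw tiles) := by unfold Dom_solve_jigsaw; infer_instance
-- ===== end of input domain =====

-- B replaces A's per-tile-pair rescan of every other tile's orientations by one edge→tile-id-set
-- index built once (objective: faster). Both Pythons raise IndexError on an empty grid or an empty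
-- row (grid[0] / row[0]); Pre_ excludes exactly those inputs.

-- ===== PORT A =====
-- shared module helpers of Source A/Source B
-- zip(*rows) for list-of-lists of strings: truncates to the shortest row (exact Python zip semantics;
-- the getD default is never reached since i < every row length)
def pyZipStar (rows : List (List String)) : List (List String) :=
  match rows with
  | [] => []
  | r :: rs =>
    let n := rs.foldl (fun m row => min m row.length) r.length
    (List.range n).map (fun i => (r :: rs).map (fun row => row.getD i ""))

-- [list(row) for row in zip(*current[::-1])]
def rot90 (g : List (List String)) : List (List String) := pyZipStar g.reverse

-- e[::-1] on a string
def strRev (s : String) : String := String.ofList s.toList.reverse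

-- get_edges(grid): [top, right, bottom, left]; grid[0]/grid[-1]/row[0]/row[-1] raise on empties,
-- excluded by Pre_; the D-defaults are unreachable there
def get_edges (g : List (List String)) : List String :=
  [PySem.Str.join "" (g.headD []),
   PySem.Str.join "" (g.map (fun row => row.getLastD "")),
   PySem.Str.join "" (g.getLastD []),
   PySem.Str.join "" (g.map (fun row => row.headD ""))]

-- get_all_orientations(grid): the two unrolled 4-iteration rotation loops (row[:] copies are identity)
def get_all_orientations (g : List (List String)) : List (List (List String)) :=
  let c1 := rot90 g
  let c2 := rot90 c1
  let c3 := rot90 c2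
  let f0 := g.map List.reverse
  let f1 := rot90 f0
  let f2 := rot90 f1
  let f3 := rot90 f2
  [g, c1, c2, c3, f0, f1, f2, f3]

def solve_jigsaw (tiles : List (Int × List (List String))) : List Int :=
  -- tile_dict (built by A, never read afterwards)
  let _tile_dict : PySem.Dict Int (List (List String)) :=
    tiles.foldl (fun d p => d.insert p.1 p.2) PySem.Dict.empty
  -- all_edges / tile_edges (built by A, never read afterwards)
  let _all_and_tile_edges : PySem.Set String × PySem.Dict Int (List String) :=
    tiles.foldl (fun acc p =>
      let edges := get_edges p.2
      (edges.foldl (fun s e => PySem.Set.add (PySem.Set.add s e) (strRev e)) acc.1,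
       acc.2.insert p.1 edges)) (PySem.Set.empty, PySem.Dict.empty)
  -- edge_counts (built by A, never read afterwards)
  let _edge_counts : PySem.Dict String (PySem.Set Int) :=
    tiles.foldl (fun d p =>
      (get_all_orientations p.2).foldl (fun d o =>
        (get_edges o).foldl (fun d e =>
          let d' := if d.contains e then d else d.insert e PySem.Set.empty
          d'.insert e (PySem.Set.add (d'.getD e PySem.Set.empty) p.1)) d) d) PySem.Dict.empty
  -- corner loop: for each tile, for each of its 4 edges, scan every OTHER tile's orientations
  tiles.foldl (fun acc p =>
    let unmatched : Int := (get_edges p.2).foldl (fun c e =>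
      let matched := tiles.any (fun q =>
        !(q.1 == p.1) && (get_all_orientations q.2).any (fun o =>
          (get_edges o).contains e || (get_edges o).contains (strRev e)))
      if matched then c else c + 1) 0
    if unmatched == 2 then acc ++ [p.1] else acc) []

-- ===== PORT B =====
def solve_jigsaw_alt (tiles : List (Int × List (List String))) : List Int :=
  -- index: edge -> set of tile ids owning it in some orientation (setdefault(e,set()).add(id))
  let index : PySem.Dict String (PySem.Set Int) :=
    tiles.foldl (fun d p =>
      (get_all_orientations p.2).foldl (fun d o =>
        (get_edges o).foldl (fun d e =>
          d.insert e (PySem.Set.add (d.getD e PySem.Set.empty) p.1)) d) d) PySem.Dict.empty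
  tiles.foldl (fun acc p =>
    let unmatched : Int := (get_edges p.2).foldl (fun c e =>
      let owners := PySem.Set.union (index.getD e PySem.Set.empty)
                                    (index.getD (strRev e) PySem.Set.empty)
      if (PySem.Set.diff owners [p.1]).isEmpty then c + 1 else c) 0
    if unmatched == 2 then acc ++ [p.1] else acc) []

-- ===== PRECONDITION & SPEC =====
-- Pre_ excludes exactly the inputs where Python A raises IndexError: a tile whose grid is empty or
-- has an empty row (grid[0] / row[0] / row[-1]); B raises there too.
def Pre_solve_jigsaw (tiles : List (Int × List (List String))) : Prop :=
  ∀ p ∈ tiles, p.2 ≠ [] ∧ ∀ row ∈ p.2, row ≠ []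
instance (tiles : List (Int × List (List String))) : Decidable (Pre_solve_jigsaw tiles) := by
  unfold Pre_solve_jigsaw; infer_instance

def pvWitness_solve_jigsaw : (List (Int × List (List String))) := [(7, [["a", "b"], ["c", "d"]])]

def Spec_solve_jigsaw (tiles : List (Int × List (List String))) (out : List Int) : Prop := out = solve_jigsaw_alt tiles
instance (tiles : List (Int × List (List String))) (out : List Int) : Decidable (Spec_solve_jigsaw tiles out) := by unfold Spec_solve_jigsaw; infer_instance

-- ===== CLAIM (what is proved, stated in full; the proofs are below) =====
def Claim_equal_solve_jigsaw : Prop := ∀ (tiles : List (Int × List (List String))), Dom_solve_jigsaw tiles → Pre_solve_jigsaw tiles → Spec_solve_jigsaw tiles (solve_jigsaw tiles)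

-- ===== LEMMAS AND PROOFS =====

-- membership in the per-edge-list index fold (fixed tile id tid)
theorem mem_idx_fold1 (es : List String) (tid : Int) (d : PySem.Dict String (PySem.Set Int))
    (x : Int) (e : String) :
    x ∈ (es.foldl (fun d e' => d.insert e' (PySem.Set.add (d.getD e' PySem.Set.empty) tid)) d).getD e PySem.Set.empty
      ↔ x ∈ d.getD e PySem.Set.empty ∨ (x = tid ∧ e ∈ es) := by
  induction es generalizing d with
  | nil => simp
  | cons a es ih =>
    simp only [List.foldl_cons, ih, PySem.Dict.getD_insert]
    by_cases h : e = a
    · subst h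
      simp [PySem.Set.mem_add]
      tauto
    · simp [h]
  -- second branch closes by simp alone

-- membership after folding a list of orientations
theorem mem_idx_fold2 (os : List (List (List String))) (tid : Int)
    (d : PySem.Dict String (PySem.Set Int)) (x : Int) (e : String) :
    x ∈ (os.foldl (fun d o => (get_edges o).foldl (fun d e' => d.insert e' (PySem.Set.add (d.getD e' PySem.Set.empty) tid)) d) d).getD e PySem.Set.empty
      ↔ x ∈ d.getD e PySem.Set.empty ∨ (x = tid ∧ ∃ o ∈ os, e ∈ get_edges o) := by
  induction os generalizing d with
  | nil => simp
  | cons o os ih =>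
    simp only [List.foldl_cons, ih, mem_idx_fold1]
    constructor
    · rintro ((hA | ⟨hx, hm⟩) | ⟨hx, o', ho', hm⟩)
      · exact Or.inl hA
      · exact Or.inr ⟨hx, o, by simp, hm⟩
      · exact Or.inr ⟨hx, o', List.mem_cons_of_mem _ ho', hm⟩
    · rintro (hA | ⟨hx, o', ho', hm⟩)
      · exact Or.inl (Or.inl hA)
      · rcases List.mem_cons.mp ho' with h | h
        · subst h; exact Or.inl (Or.inr ⟨hx, hm⟩)
        · exact Or.inr ⟨hx, o', h, hm⟩

-- membership in B's whole index fold
theorem mem_idx_fold3 (tiles : List (Int × List (List String)))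
    (d : PySem.Dict String (PySem.Set Int)) (x : Int) (e : String) :
    x ∈ (tiles.foldl (fun d p =>
          (get_all_orientations p.2).foldl (fun d o =>
            (get_edges o).foldl (fun d e' =>
              d.insert e' (PySem.Set.add (d.getD e' PySem.Set.empty) p.1)) d) d) d).getD e PySem.Set.empty
      ↔ x ∈ d.getD e PySem.Set.empty
        ∨ ∃ p ∈ tiles, p.1 = x ∧ ∃ o ∈ get_all_orientations p.2, e ∈ get_edges o := by
  induction tiles generalizing d with
  | nil => simp
  | cons t ts ih =>
    simp only [List.foldl_cons, ih, mem_idx_fold2]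
    constructor
    · rintro ((hA | ⟨hx, o, ho, hm⟩) | ⟨p, hp, hpx, o, ho, hm⟩)
      · exact Or.inl hA
      · exact Or.inr ⟨t, by simp, hx.symm, o, ho, hm⟩
      · exact Or.inr ⟨p, List.mem_cons_of_mem _ hp, hpx, o, ho, hm⟩
    · rintro (hA | ⟨p, hp, hpx, o, ho, hm⟩)
      · exact Or.inl (Or.inl hA)
      · rcases List.mem_cons.mp hp with h | h
        · subst h; exact Or.inl (Or.inr ⟨hpx.symm, o, ho, hm⟩)
        · exact Or.inr ⟨p, h, hpx, o, ho, hm⟩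

-- B's index, named for the lemmas (definitionally the fold inlined in solve_jigsaw_alt)
def bIdx (tiles : List (Int × List (List String))) : PySem.Dict String (PySem.Set Int) :=
  tiles.foldl (fun d p =>
    (get_all_orientations p.2).foldl (fun d o =>
      (get_edges o).foldl (fun d e =>
        d.insert e (PySem.Set.add (d.getD e PySem.Set.empty) p.1)) d) d) PySem.Dict.empty

-- who owns edge e (in either direction) in some orientation, read off B's index
theorem owners_mem (tiles : List (Int × List (List String))) (x : Int) (e : String) :
    x ∈ PySem.Set.union ((bIdx tiles).getD e PySem.Set.empty)
          ((bIdx tiles).getD (strRev e) PySem.Set.empty)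
      ↔ ∃ p ∈ tiles, p.1 = x ∧ ∃ o ∈ get_all_orientations p.2,
          (e ∈ get_edges o ∨ strRev e ∈ get_edges o) := by
  simp only [PySem.Set.mem_union, bIdx, mem_idx_fold3, PySem.Dict.getD_empty]
  simp only [PySem.Set.empty, List.not_mem_nil, false_or]
  constructor
  · rintro (⟨p, hp, hx, o, ho, hm⟩ | ⟨p, hp, hx, o, ho, hm⟩)
    · exact ⟨p, hp, hx, o, ho, Or.inl hm⟩
    · exact ⟨p, hp, hx, o, ho, Or.inr hm⟩
  · rintro ⟨p, hp, hx, o, ho, hm | hm⟩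
    · exact Or.inl ⟨p, hp, hx, o, ho, hm⟩
    · exact Or.inr ⟨p, hp, hx, o, ho, hm⟩

-- A's matched flag for edge e of tile tid equals the non-emptiness of B's owner set minus {tid}
theorem matched_eq (tiles : List (Int × List (List String))) (tid : Int) (e : String) :
    (tiles.any (fun q =>
        !(q.1 == tid) && (get_all_orientations q.2).any (fun o =>
          (get_edges o).contains e || (get_edges o).contains (strRev e))))
    = !((PySem.Set.diff (PySem.Set.union ((bIdx tiles).getD e PySem.Set.empty)
          ((bIdx tiles).getD (strRev e) PySem.Set.empty)) [tid]).isEmpty) := by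
  rw [Bool.eq_iff_iff]
  constructor
  · intro h
    obtain ⟨q, hq, hcond⟩ := List.any_eq_true.mp h
    rw [Bool.and_eq_true] at hcond
    obtain ⟨h1, h2⟩ := hcond
    have hne : q.1 ≠ tid := by simpa using h1
    obtain ⟨o, ho, hor⟩ := List.any_eq_true.mp h2
    have hm : e ∈ get_edges o ∨ strRev e ∈ get_edges o := by simpa using hor
    simp only [Bool.not_eq_eq_eq_not, Bool.not_true, List.isEmpty_eq_false_iff_exists_mem]
    refine ⟨q.1, ?_⟩
    rw [PySem.Set.mem_diff]
    exact ⟨(owners_mem tiles q.1 e).mpr ⟨q, hq, rfl, o, ho, hm⟩, by simpa using hne⟩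
  · intro h
    simp only [Bool.not_eq_eq_eq_not, Bool.not_true, List.isEmpty_eq_false_iff_exists_mem] at h
    obtain ⟨x, hx⟩ := h
    rw [PySem.Set.mem_diff] at hx
    obtain ⟨hu, hnot⟩ := hx
    have hx_ne : x ≠ tid := by simpa using hnot
    obtain ⟨p, hp, hpx, o, ho, hm⟩ := (owners_mem tiles x e).mp hu
    refine List.any_eq_true.mpr ⟨p, hp, ?_⟩
    have hne : p.1 ≠ tid := by rw [hpx]; exact hx_ne
    simp only [Bool.and_eq_true]
    refine ⟨by simp [hne], List.any_eq_true.mpr ⟨o, ho, ?_⟩⟩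
    rcases hm with hm | hm <;> simp [hm]

-- ===== VERDICT (by name: the statement is the Claim_ definition above) =====
theorem solve_jigsaw_spec : Claim_equal_solve_jigsaw := by
  intro tiles _ _
  unfold Spec_solve_jigsaw
  simp only [solve_jigsaw, solve_jigsaw_alt]
  apply List.foldl_ext
  intro acc p hp
  have hcount : ∀ (es : List String) (c : Int),
      es.foldl (fun c e =>
        if tiles.any (fun q =>
            !(q.1 == p.1) && (get_all_orientations q.2).any (fun o =>
              (get_edges o).contains e || (get_edges o).contains (strRev e)))
        then c else c + 1) c
      = es.foldl (fun c e =>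
        if (PySem.Set.diff (PySem.Set.union ((bIdx tiles).getD e PySem.Set.empty)
              ((bIdx tiles).getD (strRev e) PySem.Set.empty)) [p.1]).isEmpty
        then c + 1 else c) c := by
    intro es
    induction es with
    | nil => intro c; rfl
    | cons a es ih =>
      intro c
      simp only [List.foldl_cons, matched_eq tiles p.1 a, ih]
      cases h : (PySem.Set.diff (PySem.Set.union ((bIdx tiles).getD a PySem.Set.empty)
          ((bIdx tiles).getD (strRev a) PySem.Set.empty)) [p.1]).isEmpty <;> simp
  simp only [hcount (get_edges p.2) 0]
  simp only [bIdx]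
  rfl
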